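-- pv_equiv track=rewrite | github.com/unkosan/rosalind_ans | overlap_graphs.py | overlap_graphs
-- ===== SOURCE A (Python) =====
-- def overlap_graphs(adja_num: int, datadict: dict) -> list:
--     keys = list(datadict.keys())
--     result = []
--     for previouskey in keys:
--         for nextkey in keys:
--             if previouskey == nextkey:
--                 continue
--             if datadict[previouskey][-adja_num:] == datadict[nextkey][:adja_num]:
--                 result.append((previouskey, nextkey))
--     return result
-- ===== SOURCE B (Python) =====
-- def overlap_graphs(adja_num: int, datadict: dict) -> list:
--     keys = list(datadict.keys())
--     # index every key by its prefix of length adja_num (one pass)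
--     index = {}
--     for k in keys:
--         index.setdefault(datadict[k][:adja_num], []).append(k)
--     result = []
--     for p in keys:
--         for q in index.get(datadict[p][-adja_num:], []):
--             if q != p:
--                 result.append((p, q))
--     return result
-- ===== Notes on version B (the rewrite author's own statement) =====
-- stated objective: faster
-- what changed: B builds a dict from prefix-of-length-adja_num to the list of keys having it in one pass, then for each key looks up its suffix in that index, replacing A's all-pairs double loop.
import Mathlib
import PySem

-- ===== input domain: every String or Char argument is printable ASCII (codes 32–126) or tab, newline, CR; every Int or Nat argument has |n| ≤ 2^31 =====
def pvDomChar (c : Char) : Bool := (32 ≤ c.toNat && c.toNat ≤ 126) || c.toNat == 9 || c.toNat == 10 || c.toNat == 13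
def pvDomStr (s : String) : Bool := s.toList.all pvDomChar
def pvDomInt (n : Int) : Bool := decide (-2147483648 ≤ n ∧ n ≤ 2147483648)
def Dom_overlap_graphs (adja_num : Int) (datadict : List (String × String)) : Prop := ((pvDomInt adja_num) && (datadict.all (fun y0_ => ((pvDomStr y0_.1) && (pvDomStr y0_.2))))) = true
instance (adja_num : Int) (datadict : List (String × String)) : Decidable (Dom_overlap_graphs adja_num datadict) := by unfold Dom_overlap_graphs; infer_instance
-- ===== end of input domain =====

-- B replaces A's all-pairs double scan by a one-pass dict keyed by the length-adja_num prefix,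
-- looked up once per key by its suffix (objective: faster).

-- ===== PORT A =====
-- datadict[k][-adja_num:]   (k is always a key of the dict, so getD's default is never taken)
def pvSuffA (d : PySem.Dict String String) (adja_num : Int) (k : String) : String :=
  PySem.Str.slice (d.getD k "") (some (-adja_num)) none

-- datadict[k][:adja_num]
def pvPrefA (d : PySem.Dict String String) (adja_num : Int) (k : String) : String :=
  PySem.Str.slice (d.getD k "") none (some adja_num)

def overlap_graphs (adja_num : Int) (datadict : List (String × String)) : List (String × String) :=
  let d := PySem.Dict.ofList datadict
  let keys := d.keys
  keys.foldl (fun result previouskey =>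
    keys.foldl (fun result nextkey =>
      if previouskey == nextkey then result
      else if pvSuffA d adja_num previouskey == pvPrefA d adja_num nextkey then
        result ++ [(previouskey, nextkey)]
      else result) result) []

-- ===== PORT B =====
-- index.setdefault(prefix, []).append(k)  ==  modify prefix [] (· ++ [k])  (append to the stored list)
def pvIndexB (d : PySem.Dict String String) (adja_num : Int) (keys : List String) :
    PySem.Dict String (List String) :=
  keys.foldl (fun idx k => idx.modify (pvPrefA d adja_num k) [] (· ++ [k])) PySem.Dict.empty

def overlap_graphs_alt (adja_num : Int) (datadict : List (String × String)) : List (String × String) :=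
  let d := PySem.Dict.ofList datadict
  let keys := d.keys
  let index := pvIndexB d adja_num keys
  keys.foldl (fun result p =>
    (index.getD (pvSuffA d adja_num p) []).foldl (fun result q =>
      if q == p then result else result ++ [(p, q)]) result) []

-- ===== PRECONDITION & SPEC =====
def Spec_overlap_graphs (adja_num : Int) (datadict : List (String × String)) (out : List (String × String)) : Prop := out = overlap_graphs_alt adja_num datadict
instance (adja_num : Int) (datadict : List (String × String)) (out : List (String × String)) : Decidable (Spec_overlap_graphs adja_num datadict out) := by unfold Spec_overlap_graphs; infer_instance

-- ===== CLAIM (what is proved, stated in full; the proofs are below) =====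
def Claim_equal_overlap_graphs : Prop := ∀ (adja_num : Int) (datadict : List (String × String)), Dom_overlap_graphs adja_num datadict → Spec_overlap_graphs adja_num datadict (overlap_graphs adja_num datadict)

-- ===== LEMMAS AND PROOFS =====

-- what the one-pass index holds at any slot: the keys whose prefix equals the slot, in order
theorem pvIndexB_getD (d : PySem.Dict String String) (adja_num : Int) (keys : List String)
    (s : String) :
    (pvIndexB d adja_num keys).getD s [] =
      keys.filter (fun k => pvPrefA d adja_num k == s) := by
  unfold pvIndexB
  have h := PySem.Dict.getD_foldl_modify_append
    (keys.map (fun k => (pvPrefA d adja_num k, k))) (PySem.Dict.empty (κ := String) (ν := List String)) s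
  rw [List.foldl_map] at h
  simp [h, List.filter_map, List.map_map, Function.comp_def]

-- A's inner loop, characterised
theorem innerA (d : PySem.Dict String String) (a : Int) (p : String) :
    ∀ (l : List String) (acc : List (String × String)),
    l.foldl (fun result q =>
      if p == q then result
      else if pvSuffA d a p == pvPrefA d a q then result ++ [(p, q)] else result) acc
    = acc ++ (l.filter (fun q => !(p == q) && (pvSuffA d a p == pvPrefA d a q))).map
        (fun q => (p, q)) := by
  intro l
  induction l with
  | nil => intro acc; simp
  | cons q t ih =>
    intro acc
    simp only [beq_iff_eq] at ih ⊢
    rw [List.foldl_cons]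
    by_cases h1 : p = q
    · rw [if_pos h1, ih]
      simp [h1]
    · rw [if_neg h1]
      by_cases h2 : pvSuffA d a p = pvPrefA d a q
      · rw [if_pos h2, ih]
        simp [h1, h2]
      · rw [if_neg h2, ih]
        simp [h1, h2]

-- B's inner loop, characterised
theorem innerB (p : String) :
    ∀ (l : List String) (acc : List (String × String)),
    l.foldl (fun result q => if q == p then result else result ++ [(p, q)]) acc
    = acc ++ (l.filter (fun q => !(q == p))).map (fun q => (p, q)) := by
  intro l
  induction l with
  | nil => intro acc; simp
  | cons q t ih =>
    intro acc
    simp only [beq_iff_eq] at ih ⊢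
    rw [List.foldl_cons]
    by_cases h1 : q = p
    · rw [if_pos h1, ih]
      simp [h1]
    · rw [if_neg h1, ih]
      simp [h1]

-- the two inner loops produce the same block for each p
theorem blocks_eq (d : PySem.Dict String String) (a : Int) (keys : List String) (p : String)
    (acc : List (String × String)) :
    keys.foldl (fun result q =>
      if p == q then result
      else if pvSuffA d a p == pvPrefA d a q then result ++ [(p, q)] else result) acc
    = ((pvIndexB d a keys).getD (pvSuffA d a p) []).foldl
        (fun result q => if q == p then result else result ++ [(p, q)]) acc := by
  rw [innerA, innerB, pvIndexB_getD, List.filter_filter]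
  congr 2
  apply List.filter_congr
  intro q _
  rw [Bool.beq_comm (a := p) (b := q), Bool.beq_comm (a := pvSuffA d a p) (b := pvPrefA d a q)]

-- ===== VERDICT (by name: the statement is the Claim_ definition above) =====
theorem overlap_graphs_spec : Claim_equal_overlap_graphs := by
  intro adja_num datadict _
  unfold Spec_overlap_graphs overlap_graphs overlap_graphs_alt
  apply PySem.List.foldl_congr_mem'
  intro p _ acc
  exact blocks_eq _ _ _ _ _
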